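-- pv_equiv track=rewrite | github.com/vvrmahendra/DS-AlgoPrac | miscellaneous_algos/product3.py | solve
-- ===== SOURCE A (Python) =====
-- def solve(A):
--     if len(A) <=2 : return [-1 for i in A]
--     min_ = []
--     max_ = []
--     ans = []
--     for i in A:
--         if len(ans) < 2:
--             min_.append(i)
--             max_.append(i)
--             ans.append(-1)
--         else:
--             max_.append(i)
--             max_.sort(reverse = True)
--             a, b, c = max_[:3]
--             if len(max_) > 3:
--                 max_.pop()
--             min_.append(i)
--             min_.sort()
--             min_.pop()
--             d, e = min_
--             ans.append(max(a*b*c, a*d*e))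
--     return ans
-- ===== SOURCE B (Python) =====
-- def solve(A):
--     ans = []
--     for i in range(len(A)):
--         if i < 2:
--             ans.append(-1)
--         else:
--             s = sorted(A[:i+1], reverse=True)
--             a, b, c = s[:3]
--             d, e = s[-2:]
--             ans.append(max(a*b*c, a*d*e))
--     return ans
-- ===== Notes on version B (the rewrite author's own statement) =====
-- stated objective: simpler
-- what changed: B drops A's incrementally maintained truncated top-3/bottom-2 state lists and instead recomputes each prefix's answer from scratch by sorting the whole prefix once per index, reading the top three and bottom two off the sorted prefix.
import Mathlib
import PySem

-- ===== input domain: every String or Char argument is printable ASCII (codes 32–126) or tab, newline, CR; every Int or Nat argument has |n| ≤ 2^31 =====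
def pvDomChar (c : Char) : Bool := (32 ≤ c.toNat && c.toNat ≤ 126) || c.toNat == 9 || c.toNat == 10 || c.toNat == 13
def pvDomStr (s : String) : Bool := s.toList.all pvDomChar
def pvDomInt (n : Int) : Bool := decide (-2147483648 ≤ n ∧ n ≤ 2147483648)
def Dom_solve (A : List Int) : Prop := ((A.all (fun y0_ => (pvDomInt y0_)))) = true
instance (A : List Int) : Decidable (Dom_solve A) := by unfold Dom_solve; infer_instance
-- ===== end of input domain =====

-- B recomputes each prefix's answer from scratch by sorting the prefix, instead of A's
-- incremental truncated top-3/bottom-2 maintenance: simpler (shorter, stateless), not faster.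


-- ===== PORT A =====
-- one iteration of A's for-loop; state = (min_, max_, ans)
def solveStep : List Int × List Int × List Int → Int → List Int × List Int × List Int
  | (min_, max_, ans), i =>
    if ans.length < 2 then
      (min_ ++ [i], max_ ++ [i], ans ++ [-1])
    else
      -- max_.append(i); max_.sort(reverse=True)
      let m1 := PySem.List.sorted (max_ ++ [i]) (fun x => x) true
      -- a, b, c = max_[:3]  (always three elements here; fallback unreachable)
      match PySem.List.slice m1 none (some 3) with
      | [a, b, c] =>
        -- if len(max_) > 3: max_.pop()
        let m2 := if 3 < m1.length then
            match PySem.List.pop? m1 with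
            | some (_, rest) => rest
            | none => m1
          else m1
        -- min_.append(i); min_.sort(); min_.pop()
        let n1 := PySem.List.sorted (min_ ++ [i]) (fun x => x) false
        let n2 := match PySem.List.pop? n1 with
          | some (_, rest) => rest
          | none => n1
        -- d, e = min_  (always two elements here; fallback unreachable)
        match n2 with
        | [d, e] => (n2, m2, ans ++ [max (a * b * c) (a * d * e)])
        | _ => (n2, m2, ans)
      | _ => (min_, max_, ans)

def solve (A : List Int) : List Int :=
  if A.length ≤ 2 then A.map (fun _ => (-1 : Int))
  else (A.foldl solveStep ([], [], [])).2.2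

-- ===== PORT B =====
def solve_alt (A : List Int) : List Int :=
  (PySem.List.pyRange 0 (A.length : Int) 1).foldl
    (fun ans i =>
      if i < 2 then ans ++ [-1]
      else
        -- s = sorted(A[:i+1], reverse=True)
        let s := PySem.List.sorted (PySem.List.slice A none (some (i + 1))) (fun x => x) true
        -- a, b, c = s[:3]; d, e = s[-2:]  (both always match here; fallback unreachable)
        match PySem.List.slice s none (some 3), PySem.List.slice s (some (-2)) none with
        | [a, b, c], [d, e] => ans ++ [max (a * b * c) (a * d * e)]
        | _, _ => ans) []

-- ===== PRECONDITION & SPEC =====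
def Spec_solve (A : List Int) (out : List Int) : Prop := out = solve_alt A
instance (A : List Int) (out : List Int) : Decidable (Spec_solve A out) := by unfold Spec_solve; infer_instance

-- ===== CLAIM (what is proved, stated in full; the proofs are below) =====
def Claim_equal_solve : Prop := ∀ (A : List Int), Dom_solve A → Spec_solve A (solve A)

-- ===== LEMMAS AND PROOFS =====

-- ascending / descending Python sorts of an Int list
def sortA (p : List Int) : List Int := PySem.List.sorted p (fun x => x) false
def sortD (p : List Int) : List Int := PySem.List.sorted p (fun x => x) true

-- the value appended for a prefix p (|p| ≥ 3): top-3 product vs top·bottom-2 product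
def bval (p : List Int) : Int :=
  match (sortD p).take 3, (sortA p).take 2 with
  | [a, b, c], [d, e] => max (a * b * c) (a * d * e)
  | _, _ => 0

-- the values appended while consuming `rest` after prefix `p`
def vals (p : List Int) : List Int → List Int
  | [] => []
  | x :: r => bval (p ++ [x]) :: vals (p ++ [x]) r

theorem length_sortA (p : List Int) : (sortA p).length = p.length := by
  exact PySem.List.length_sorted p _ false
theorem length_sortD (p : List Int) : (sortD p).length = p.length := by
  exact PySem.List.length_sorted p _ true
theorem sortA_perm (p : List Int) : (sortA p).Perm p := PySem.List.sorted_perm p _ false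
theorem sortD_perm (p : List Int) : (sortD p).Perm p := PySem.List.sorted_perm p _ true
theorem sortA_pairwise (p : List Int) : (sortA p).Pairwise (fun a b => a ≤ b) := by
  simpa using PySem.List.sorted_pairwise p (fun x => x)
theorem sortD_pairwise (p : List Int) : (sortD p).Pairwise (fun a b => b ≤ a) := by
  simpa using PySem.List.sorted_pairwise_rev p (fun x => x)
theorem sortA_congr {xs ys : List Int} (h : xs.Perm ys) : sortA xs = sortA ys := by
  unfold sortA
  rw [PySem.List.sorted_eq_sorted_of_perm xs ys (fun x => x) (fun a b h => h) h]
theorem sortD_eq_reverse_sortA (p : List Int) : sortD p = (sortA p).reverse := by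
  refine List.Perm.eq_of_pairwise (fun a b _ _ h1 h2 => le_antisymm h2 h1)
    (sortD_pairwise p) (List.pairwise_reverse.mpr (by simpa using sortA_pairwise p)) ?_
  exact ((sortD_perm p).trans (sortA_perm p).symm).trans (List.reverse_perm _).symm
theorem sortD_congr {xs ys : List Int} (h : xs.Perm ys) : sortD xs = sortD ys := by
  rw [sortD_eq_reverse_sortA, sortD_eq_reverse_sortA, sortA_congr h]

-- ordered insertion, descending and ascending
def insD (i : Int) : List Int → List Int
  | [] => [i]
  | x :: t => if i ≤ x then x :: insD i t else i :: x :: t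
def insA (i : Int) : List Int → List Int
  | [] => [i]
  | x :: t => if x ≤ i then x :: insA i t else i :: x :: t

theorem insD_perm (i : Int) (s : List Int) : (insD i s).Perm (i :: s) := by
  induction s with
  | nil => rfl
  | cons x t ih =>
    simp only [insD]
    split_ifs with hix
    · exact (ih.cons x).trans (List.Perm.swap i x t)
    · exact List.Perm.refl _
theorem insA_perm (i : Int) (s : List Int) : (insA i s).Perm (i :: s) := by
  induction s with
  | nil => rfl
  | cons x t ih =>
    simp only [insA]
    split_ifs with hix
    · exact (ih.cons x).trans (List.Perm.swap i x t)
    · exact List.Perm.refl _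
theorem insD_pairwise {s : List Int} (i : Int) (h : s.Pairwise (fun a b => b ≤ a)) :
    (insD i s).Pairwise (fun a b => b ≤ a) := by
  induction s with
  | nil => simp [insD]
  | cons x t ih =>
    rw [List.pairwise_cons] at h
    simp only [insD]
    split_ifs with hix
    · refine List.pairwise_cons.mpr ⟨fun y hy => ?_, ih h.2⟩
      rcases List.mem_cons.mp (((insD_perm i t).mem_iff).mp hy) with hy' | hy'
      · exact hy' ▸ hix
      · exact h.1 y hy'
    · refine List.pairwise_cons.mpr ⟨fun y hy => ?_, List.pairwise_cons.mpr ⟨h.1, h.2⟩⟩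
      rcases List.mem_cons.mp hy with hy' | hy'
      · exact hy' ▸ le_of_lt (lt_of_not_ge hix)
      · exact le_trans (h.1 y hy') (le_of_lt (lt_of_not_ge hix))
theorem insA_pairwise {s : List Int} (i : Int) (h : s.Pairwise (fun a b => a ≤ b)) :
    (insA i s).Pairwise (fun a b => a ≤ b) := by
  induction s with
  | nil => simp [insA]
  | cons x t ih =>
    rw [List.pairwise_cons] at h
    simp only [insA]
    split_ifs with hix
    · refine List.pairwise_cons.mpr ⟨fun y hy => ?_, ih h.2⟩
      rcases List.mem_cons.mp (((insA_perm i t).mem_iff).mp hy) with hy' | hy'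
      · exact hy' ▸ hix
      · exact h.1 y hy'
    · refine List.pairwise_cons.mpr ⟨fun y hy => ?_, List.pairwise_cons.mpr ⟨h.1, h.2⟩⟩
      rcases List.mem_cons.mp hy with hy' | hy'
      · exact hy' ▸ le_of_lt (lt_of_not_ge hix)
      · exact le_trans (le_of_lt (lt_of_not_ge hix)) (h.1 y hy')
theorem sortD_append_singleton {s : List Int} (i : Int) (h : s.Pairwise (fun a b => b ≤ a)) :
    sortD (s ++ [i]) = insD i s := by
  refine List.Perm.eq_of_pairwise (fun a b _ _ h1 h2 => le_antisymm h2 h1)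
    (sortD_pairwise _) (insD_pairwise i h) ?_
  exact ((sortD_perm _).trans (List.perm_append_singleton i s)).trans (insD_perm i s).symm
theorem sortA_append_singleton {s : List Int} (i : Int) (h : s.Pairwise (fun a b => a ≤ b)) :
    sortA (s ++ [i]) = insA i s := by
  refine List.Perm.eq_of_pairwise (fun a b _ _ h1 h2 => le_antisymm h1 h2)
    (sortA_pairwise _) (insA_pairwise i h) ?_
  exact ((sortA_perm _).trans (List.perm_append_singleton i s)).trans (insA_perm i s).symm
theorem take_insD_take (i : Int) : ∀ (s : List Int) (k : Nat),
    (insD i (s.take k)).take k = (insD i s).take k := by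
  intro s
  induction s with
  | nil => intro k; simp
  | cons x t ih =>
    intro k
    match k with
    | 0 => simp
    | Nat.succ k =>
      simp only [List.take_succ_cons, insD]
      split_ifs with hix
      · simp only [List.take_succ_cons]; rw [ih k]
      · match k with
        | 0 => simp
        | Nat.succ k' =>
          simp only [List.take_succ_cons, List.take_take]
          rw [Nat.min_eq_left (by omega)]
theorem take_insA_take (i : Int) : ∀ (s : List Int) (k : Nat),
    (insA i (s.take k)).take k = (insA i s).take k := by
  intro s
  induction s with
  | nil => intro k; simp
  | cons x t ih =>
    intro k
    match k with
    | 0 => simp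
    | Nat.succ k =>
      simp only [List.take_succ_cons, insA]
      split_ifs with hix
      · simp only [List.take_succ_cons]; rw [ih k]
      · match k with
        | 0 => simp
        | Nat.succ k' =>
          simp only [List.take_succ_cons, List.take_take]
          rw [Nat.min_eq_left (by omega)]

-- maintaining the truncated top-3 (resp. bottom-2) is the top-3 (bottom-2) of the prefix
theorem topD (p : List Int) (i : Int) :
    (sortD ((sortD p).take 3 ++ [i])).take 3 = (sortD (p ++ [i])).take 3 := by
  have hT : ((sortD p).take 3).Pairwise (fun a b => b ≤ a) :=
    List.Pairwise.sublist (List.take_sublist 3 _) (sortD_pairwise p)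
  rw [sortD_append_singleton i hT, take_insD_take, ← sortD_append_singleton i (sortD_pairwise p)]
  exact congrArg (List.take 3) (sortD_congr ((sortD_perm p).append_right [i]))
theorem botA (p : List Int) (i : Int) :
    (sortA ((sortA p).take 2 ++ [i])).take 2 = (sortA (p ++ [i])).take 2 := by
  have hT : ((sortA p).take 2).Pairwise (fun a b => a ≤ b) :=
    List.Pairwise.sublist (List.take_sublist 2 _) (sortA_pairwise p)
  rw [sortA_append_singleton i hT, take_insA_take, ← sortA_append_singleton i (sortA_pairwise p)]
  exact congrArg (List.take 2) (sortA_congr ((sortA_perm p).append_right [i]))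

theorem exists_three {l : List Int} (h : l.length = 3) : ∃ a b c : Int, l = [a, b, c] := by
  match l, h with
  | [a, b, c], _ => exact ⟨a, b, c, rfl⟩
theorem exists_two {l : List Int} (h : l.length = 2) : ∃ d e : Int, l = [d, e] := by
  match l, h with
  | [d, e], _ => exact ⟨d, e, rfl⟩
theorem slice_to_three (l : List Int) : PySem.List.slice l none (some 3) = l.take 3 := by
  have h : (3 : Int) = ((3 : Nat) : Int) := by norm_num
  rw [h, PySem.List.slice_to_natCast]
theorem pop?_of_ne_nil {l : List Int} (h : l ≠ []) :
    PySem.List.pop? l = some (l.getLast h, l.dropLast) := by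
  have h0 := PySem.List.pop?_last l.dropLast (l.getLast h)
  rw [List.dropLast_concat_getLast h] at h0
  exact h0

-- A's else branch, characterised
theorem solveStep_else (p : List Int) (i : Int) (min_ max_ ans : List Int)
    (hp : 2 ≤ p.length) (hans : 2 ≤ ans.length)
    (hmin : min_.Perm ((sortA p).take 2)) (hmax : max_.Perm ((sortD p).take 3)) :
    solveStep (min_, max_, ans) i =
      ((sortA (p ++ [i])).take 2, (sortD (p ++ [i])).take 3, ans ++ [bval (p ++ [i])]) := by
  have hTA : ((sortA p).take 2).Pairwise (fun a b => a ≤ b) :=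
    List.Pairwise.sublist (List.take_sublist 2 _) (sortA_pairwise p)
  have hTD : ((sortD p).take 3).Pairwise (fun a b => b ≤ a) :=
    List.Pairwise.sublist (List.take_sublist 3 _) (sortD_pairwise p)
  have hlmin : min_.length = 2 := by
    have h0 := hmin.length_eq
    rw [List.length_take, length_sortA] at h0
    omega
  have hlmax : max_.length = min 3 p.length := by
    have h0 := hmax.length_eq
    rw [List.length_take, length_sortD] at h0
    omega
  have hm1take : (sortD (max_ ++ [i])).take 3 = (sortD (p ++ [i])).take 3 := by
    rw [sortD_congr (hmax.append_right [i]), topD]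
  have hn1take : (sortA (min_ ++ [i])).take 2 = (sortA (p ++ [i])).take 2 := by
    rw [sortA_congr (hmin.append_right [i]), botA]
  have hm1len : (sortD (max_ ++ [i])).length = max_.length + 1 := by
    rw [length_sortD, List.length_append, List.length_cons, List.length_nil]
  have hn1len : (sortA (min_ ++ [i])).length = 3 := by
    rw [length_sortA, List.length_append, List.length_cons, List.length_nil, hlmin]
  obtain ⟨a, b, c, habc⟩ := exists_three (l := (sortD (p ++ [i])).take 3)
    (by rw [List.length_take, length_sortD, List.length_append]; simp; omega)
  obtain ⟨d, e, hde⟩ := exists_two (l := (sortA (p ++ [i])).take 2)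
    (by rw [List.length_take, length_sortA, List.length_append]; simp; omega)
  have hslice : PySem.List.slice (sortD (max_ ++ [i])) none (some 3) = [a, b, c] := by
    rw [slice_to_three, hm1take, habc]
  have hne : sortD (max_ ++ [i]) ≠ [] := by
    apply List.ne_nil_of_length_pos
    omega
  have hnne : sortA (min_ ++ [i]) ≠ [] := by
    apply List.ne_nil_of_length_pos
    omega
  have hm2 : (if 3 < (sortD (max_ ++ [i])).length then
      match PySem.List.pop? (sortD (max_ ++ [i])) with
      | some (_, rest) => rest
      | none => sortD (max_ ++ [i])
    else sortD (max_ ++ [i])) = [a, b, c] := by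
    by_cases hc : 3 < (sortD (max_ ++ [i])).length
    · rw [if_pos hc, pop?_of_ne_nil hne]
      show (sortD (max_ ++ [i])).dropLast = _
      rw [List.dropLast_eq_take, ← habc, ← hm1take]
      congr 1
      omega
    · rw [if_neg hc, ← List.take_of_length_le (l := sortD (max_ ++ [i])) (i := 3) (by omega),
        hm1take, habc]
  have hn2 : (match PySem.List.pop? (sortA (min_ ++ [i])) with
      | some (_, rest) => rest
      | none => sortA (min_ ++ [i])) = [d, e] := by
    rw [pop?_of_ne_nil hnne]
    show (sortA (min_ ++ [i])).dropLast = _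
    rw [List.dropLast_eq_take, ← hde, ← hn1take]
    congr 1
    omega
  have hbval : bval (p ++ [i]) = max (a * b * c) (a * d * e) := by
    rw [bval, habc, hde]
  simp only [solveStep]
  rw [if_neg (by omega)]
  simp only [sortA, sortD] at hslice hm2 hn2
  simp only [hslice, hm2, hn2]
  rw [habc, hde, hbval]

theorem foldl_solveStep (rest : List Int) : ∀ (p min_ max_ ans : List Int),
    2 ≤ p.length → 2 ≤ ans.length →
    min_.Perm ((sortA p).take 2) → max_.Perm ((sortD p).take 3) →
    (List.foldl solveStep (min_, max_, ans) rest).2.2 = ans ++ vals p rest := by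
  induction rest with
  | nil => intro p min_ max_ ans _ _ _ _; simp [vals]
  | cons x r ih =>
    intro p min_ max_ ans hp hans hmin hmax
    rw [List.foldl_cons, solveStep_else p x min_ max_ ans hp hans hmin hmax]
    rw [ih (p ++ [x]) _ _ _ (by simp; omega) (by simp; omega) (List.Perm.refl _) (List.Perm.refl _)]
    simp [vals]

theorem solve_big (A : List Int) (hA : 3 ≤ A.length) :
    solve A = -1 :: -1 :: vals (A.take 2) (A.drop 2) := by
  match A, hA with
  | a0 :: a1 :: r, hA3 =>
    have hperm1 : [a0, a1].Perm ((sortA [a0, a1]).take 2) := by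
      rw [List.take_of_length_le (by rw [length_sortA]; simp)]
      exact (sortA_perm _).symm
    have hperm2 : [a0, a1].Perm ((sortD [a0, a1]).take 3) := by
      rw [List.take_of_length_le (by rw [length_sortD]; simp)]
      exact (sortD_perm _).symm
    have s1 : solveStep ([], [], []) a0 = ([a0], [a0], [-1]) := by simp [solveStep]
    have s2 : solveStep ([a0], [a0], [-1]) a1 = ([a0, a1], [a0, a1], [-1, -1]) := by
      simp [solveStep]
    rw [solve, if_neg (by simp only [List.length_cons] at hA3 ⊢; omega)]
    rw [List.foldl_cons, List.foldl_cons, s1, s2]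
    rw [foldl_solveStep r [a0, a1] _ _ _ (by simp) (by simp) hperm1 hperm2]
    rfl

-- B side
theorem foldl_append_map (g : Nat → Int) (step : List Int → Nat → List Int) :
    ∀ (l : List Nat) (acc : List Int), (∀ i ∈ l, ∀ a, step a i = a ++ [g i]) →
    l.foldl step acc = acc ++ l.map g := by
  intro l
  induction l with
  | nil => intro acc h; simp
  | cons x t ih =>
    intro acc h
    rw [List.foldl_cons, h x (by simp), ih (acc ++ [g x]) (fun i hi a => h i (by simp [hi]) a)]
    simp

theorem solve_alt_map (A : List Int) :
    solve_alt A = (List.range A.length).map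
      (fun (k : Nat) => if (k : Int) < 2 then (-1 : Int) else bval (A.take (k + 1))) := by
  rw [solve_alt, PySem.List.pyRange_one]
  have hn : (((A.length : Int)) - 0).toNat = A.length := by simp
  rw [hn, List.foldl_map]
  refine foldl_append_map _ _ (List.range A.length) [] ?_
  intro k hk ans
  rw [List.mem_range] at hk
  simp only [zero_add]
  by_cases hk2 : (k : Int) < 2
  · rw [if_pos hk2, if_pos hk2]
  · rw [if_neg hk2, if_neg hk2]
    have hk2' : 2 ≤ k := by omega
    have hp : PySem.List.slice A none (some ((k : Int) + 1)) = A.take (k + 1) := by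
      have h1 : ((k : Int) + 1) = (((k + 1 : Nat)) : Int) := by push_cast; ring
      rw [h1, PySem.List.slice_to_natCast]
    rw [hp]
    have hlp : (A.take (k + 1)).length = k + 1 := by
      rw [List.length_take]
      omega
    obtain ⟨a', b', c', habc⟩ := exists_three (l := (sortD (A.take (k + 1))).take 3)
      (by rw [List.length_take, length_sortD, hlp]; omega)
    obtain ⟨d', e', hde⟩ := exists_two (l := (sortA (A.take (k + 1))).take 2)
      (by rw [List.length_take, length_sortA, hlp]; omega)
    have h3 : PySem.List.slice (sortD (A.take (k + 1))) none (some 3) = [a', b', c'] := by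
      rw [slice_to_three, habc]
    have h2 : PySem.List.slice (sortD (A.take (k + 1))) (some (-2)) none = [e', d'] := by
      rw [PySem.List.slice_from_neg_ofNat _ 2 (by norm_num)]
      rw [sortD_eq_reverse_sortA, List.length_reverse, List.drop_reverse, length_sortA]
      have h4 : (A.take (k + 1)).length - ((A.take (k + 1)).length - 2) = 2 := by
        omega
      rw [h4, hde]
      rfl
    simp only [sortD] at h3 h2
    simp only [h3, h2]
    rw [bval, habc, hde]
    have : a' * e' * d' = a' * d' * e' := by ring
    rw [this]

theorem vals_eq_map : ∀ (rest p : List Int),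
    vals p rest = (List.range rest.length).map
      (fun j => bval ((p ++ rest).take (p.length + j + 1))) := by
  intro rest
  induction rest with
  | nil => intro p; rfl
  | cons x r ih =>
    intro p
    show bval (p ++ [x]) :: vals (p ++ [x]) r = _
    rw [List.length_cons, List.range_succ_eq_map, List.map_cons, List.map_map]
    have e0 : (p ++ x :: r).take (p.length + 0 + 1) = p ++ [x] := by
      rw [List.take_append]
      simp
    rw [e0, ih (p ++ [x])]
    congr 1
    refine List.map_congr_left (fun j hj => ?_)
    simp only [Function.comp_apply]
    congr 1
    rw [List.append_assoc]
    simp only [List.singleton_append, List.length_append, List.length_cons, List.length_nil]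
    congr 1
    omega

-- ===== VERDICT (by name: the statement is the Claim_ definition above) =====
theorem solve_spec : Claim_equal_solve := by
  intro A _
  unfold Spec_solve
  rw [solve_alt_map]
  by_cases h : A.length ≤ 2
  · rw [solve, if_pos h, List.map_const']
    rw [List.map_congr_left (l := List.range A.length) (g := fun _ => (-1 : Int)) (fun k hk => by
      rw [List.mem_range] at hk
      exact if_pos (by omega))]
    rw [List.map_const', List.length_range]
  · have h3 : 3 ≤ A.length := by omega
    rw [solve_big A h3]
    have hm : A.length = 2 + (A.drop 2).length := by
      rw [List.length_drop]; omega
    rw [hm, List.range_add, List.map_append, List.map_map]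
    have hfirst : (List.range 2).map
        (fun (k : Nat) => if (k : Int) < 2 then (-1 : Int) else bval (A.take (k + 1))) =
        [-1, -1] := by
      norm_num [List.range_succ]
    rw [hfirst]
    rw [vals_eq_map]
    have htd : A.take 2 ++ A.drop 2 = A := List.take_append_drop 2 A
    have hlt : (A.take 2).length = 2 := by rw [List.length_take]; omega
    rw [htd, hlt]
    refine congrArg (fun l => [(-1 : Int), -1] ++ l) ?_
    refine List.map_congr_left (fun j hj => ?_)
    simp only [Function.comp_apply]
    rw [if_neg (by push_cast; omega)]
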